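-- pv_equiv track=rewrite | github.com/MD-MAFUJUL-HASAN/HackerRank_Interview-Preparation-Kits | 1 Month Preparation Kit/Week 3/Waiter/Waiter.py | waiter
-- ===== SOURCE A (Python) =====
-- def waiter(number, q):
--     # Write your code here
--     res, prime = [], [2]
--     for i in range(q):
--         nextPr = prime[-1]
--         if i > 0:
--             notPrime = True
--             while notPrime:
--                 nextPr += 1
--                 for p in prime:
--                     if nextPr%p == 0:
--                         break
--                     if p == prime[-1]:
--                         prime.append(nextPr)
--                         notPrime = False
--         a = []
--         for n in number:
--             if n%nextPr == 0:
--                 res.append(n)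
--             else:
--                 a.insert(0, n)
--         number = a
--     while number:
--         res.append(number.pop())
--     return res
-- ===== SOURCE B (Python) =====
-- def waiter(number, q):
--     # B: generate the first q primes by trial division with all(), then classify
--     # each plate in ONE pass by its first dividing prime, and assemble the answer
--     # from the groups using the reversal parity of A's repeated stack flips.
--     primes, cand = [], 2
--     while len(primes) < q:
--         while not all(cand % p for p in primes):
--             cand += 1
--         primes.append(cand)
--         cand += 1
--     groups = [[] for _ in primes]
--     rest = []
--     for n in number:
--         for i, p in enumerate(primes):
--             if n % p == 0:
--                 groups[i].append(n)
--                 break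
--         else:
--             rest.append(n)
--     res = []
--     for i, g in enumerate(groups):
--         res += g if i % 2 == 0 else g[::-1]
--     res += rest if len(primes) % 2 == 1 else rest[::-1]
--     return res
-- ===== Notes on version B (the rewrite author's own statement) =====
-- stated objective: faster
-- what changed: Instead of A's q partition passes that rebuild the stack with insert(0) each round, B classifies every plate once by its first dividing prime among the first q primes (generated by an all()-based trial-division loop) and assembles the groups using the reversal parity of A's repeated stack flips.
import Mathlib
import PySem

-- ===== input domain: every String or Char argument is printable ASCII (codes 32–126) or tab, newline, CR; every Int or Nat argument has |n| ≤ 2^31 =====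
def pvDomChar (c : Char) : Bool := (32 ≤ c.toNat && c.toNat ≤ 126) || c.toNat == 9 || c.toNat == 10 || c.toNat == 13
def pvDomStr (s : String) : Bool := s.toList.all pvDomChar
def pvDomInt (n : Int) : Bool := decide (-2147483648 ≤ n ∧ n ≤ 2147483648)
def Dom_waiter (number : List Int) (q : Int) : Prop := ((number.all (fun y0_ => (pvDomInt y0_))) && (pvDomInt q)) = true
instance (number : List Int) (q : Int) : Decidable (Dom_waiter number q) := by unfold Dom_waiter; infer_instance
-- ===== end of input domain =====

-- B replaces A's q partition passes (each rebuilding the stack with insert(0)) by ONE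
-- classification pass over the plates plus a parity-of-reversals assembly; note A also
-- MUTATES the caller's list (pop) when q <= 0 — the equivalence here is about the return value.

-- ===== PORT A =====

-- prime[-1] (the list is never empty in A; .getD 0 is only a totality guard)
def pvLastA (P : List Int) : Int := (PySem.List.pyGet? P (-1)).getD 0

-- the `for p in prime:` sweep of A testing candidate c: reject at the first divisor,
-- accept when p reaches prime[-1].  (In Python the accept also appends c and the
-- continued iteration immediately breaks at c % c == 0, so the sweep's only outcome
-- is accept/reject; the append is performed by the caller pvLoopA below.)
def pvTestA (full : List Int) (c : Int) : List Int → Bool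
  | [] => false
  | p :: rest =>
    if PySem.Int.mod c p == 0 then false
    else if p == pvLastA full then true
    else pvTestA full c rest

-- invariant of A's prime list, carried only so that the unbounded `while notPrime`
-- search can be expressed as a least-candidate search (Nat.find)
def pvInvA (P : List Int) : Prop := P ≠ [] ∧ List.Pairwise (· < ·) P ∧ ∀ p ∈ P, 2 ≤ p

lemma pvLastA_singleton (x : Int) : pvLastA [x] = x := by
  simp [pvLastA, PySem.List.pyGet?_neg_one]

lemma pvLastA_append (pre l : List Int) (h : l ≠ []) : pvLastA (pre ++ l) = pvLastA l := by
  simp [pvLastA, PySem.List.pyGet?_neg_one, List.getLast?_append,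
    List.getLast?_eq_some_getLast (h := h)]

lemma pvLastA_mem (P : List Int) (h : P ≠ []) : pvLastA P ∈ P := by
  simp [pvLastA, PySem.List.pyGet?_neg_one, List.getLast?_eq_some_getLast (h := h)]

lemma pvLastA_ge (P : List Int) (hs : List.Pairwise (· < ·) P) :
    ∀ p ∈ P, p ≤ pvLastA P := by
  induction P with
  | nil => simp
  | cons x t ih =>
    intro p hp
    obtain ⟨hx, ht⟩ := List.pairwise_cons.mp hs
    cases t with
    | nil =>
      simp at hp
      subst hp
      rw [pvLastA_singleton]
    | cons y ts =>
      rw [show x :: y :: ts = [x] ++ (y :: ts) from rfl,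
        pvLastA_append [x] (y :: ts) (by simp)]
      rcases List.mem_cons.mp hp with rfl | hp'
      · have hm := pvLastA_mem (y :: ts) (by simp)
        have := hx _ hm
        omega
      · exact ih ht p hp'

lemma pvTestA_suffix (P : List Int) (hs : List.Pairwise (· < ·) P) (c : Int) :
    ∀ l pre, P = pre ++ l → l ≠ [] →
      (pvTestA P c l = true ↔ ∀ p ∈ l, PySem.Int.mod c p ≠ 0) := by
  intro l
  induction l with
  | nil => intro pre _ h; exact absurd rfl h
  | cons p rest ih =>
    intro pre hP _
    cases hrest : rest with
    | nil =>
      subst hrest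
      have hlast : pvLastA P = p := by
        rw [hP, pvLastA_append pre [p] (by simp), pvLastA_singleton]
      by_cases hdvd : PySem.Int.mod c p = 0 <;>
        simp [pvTestA, hdvd, hlast]
    | cons r rs =>
      subst hrest
      have hlast : pvLastA P = pvLastA (r :: rs) := by
        rw [hP, pvLastA_append pre _ (by simp),
          show p :: r :: rs = [p] ++ (r :: rs) from rfl,
          pvLastA_append [p] _ (by simp)]
      have hm := pvLastA_mem (r :: rs) (by simp)
      have hlt : p < pvLastA (r :: rs) := by
        rw [hP] at hs
        have h2 := (List.pairwise_append.mp hs).2.1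
        exact (List.pairwise_cons.mp h2).1 _ hm
      have hne : (p == pvLastA P) = false := by
        simp [hlast]; omega
      have ihr := ih (pre ++ [p]) (by simpa using hP) (by simp)
      by_cases hdvd : PySem.Int.mod c p = 0
      · simp [pvTestA, hdvd]
      · show pvTestA P c (p :: r :: rs) = true ↔ _
        rw [show pvTestA P c (p :: r :: rs) = pvTestA P c (r :: rs) by
          simp [pvTestA, hdvd, hne]]
        rw [ihr]
        simp [hdvd]

lemma pvTestA_iff (P : List Int) (h : pvInvA P) (c : Int) :
    pvTestA P c P = true ↔ ∀ p ∈ P, PySem.Int.mod c p ≠ 0 :=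
  pvTestA_suffix P h.2.1 c P [] rfl h.1

-- a candidate with no divisor in P always exists beyond any start (c ≡ 1 modulo the product)
lemma pvNoDiv_exists (P : List Int) (hP : ∀ p ∈ P, 2 ≤ p) (start : Int) :
    ∃ n : Nat, ∀ p ∈ P, PySem.Int.mod (start + (n : Int)) p ≠ 0 := by
  have hpos : 0 < P.prod := List.prod_pos (fun p hp => by have := hP p hp; omega)
  set M : Int := P.prod with hM
  set c : Int := M * (start.natAbs + 1) + 1 with hc
  have hcs : start ≤ c := by
    have h1 : ((start.natAbs : Int) + 1) ≤ M * ((start.natAbs : Int) + 1) := by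
      nlinarith [Int.natCast_nonneg start.natAbs]
    have hsa : start ≤ (start.natAbs : Int) := Int.le_natAbs
    omega
  refine ⟨(c - start).toNat, fun p hp hmod => ?_⟩
  have hceq : start + (((c - start).toNat : Nat) : Int) = c := by omega
  rw [hceq] at hmod
  have hpc : p ∣ c := (PySem.Int.mod_eq_zero_iff_dvd _ _).mp hmod
  have hpM : p ∣ M := List.dvd_prod hp
  have hp1 : p ∣ (1 : Int) := by
    have hd := dvd_sub hpc (hpM.mul_right ((start.natAbs : Int) + 1))
    have : c - M * ((start.natAbs : Int) + 1) = 1 := by rw [hc]; ring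
    rwa [this] at hd
  have := Int.le_of_dvd one_pos hp1
  have := hP p hp
  omega

lemma pvNextA_exists (P : List Int) (h : pvInvA P) (start : Int) :
    ∃ n : Nat, pvTestA P (start + 1 + (n : Int)) P = true := by
  obtain ⟨n, hn⟩ := pvNoDiv_exists P h.2.2 (start + 1)
  exact ⟨n, (pvTestA_iff P h _).mpr (by simpa using hn)⟩

-- the `while notPrime: nextPr += 1 …` search: the least accepted candidate above prime[-1]
def pvNextA (P : List Int) (h : pvInvA P) : Int :=
  pvLastA P + 1 + (Nat.find (pvNextA_exists P h (pvLastA P)) : Int)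

lemma pvNextA_gt (P : List Int) (h : pvInvA P) : ∀ p ∈ P, p < pvNextA P h := by
  intro p hp
  have h1 := pvLastA_ge P h.2.1 p hp
  have h2 : (0 : Int) ≤ (Nat.find (pvNextA_exists P h (pvLastA P)) : Int) := by positivity
  unfold pvNextA; omega

lemma pvInvA_append (P : List Int) (h : pvInvA P) : pvInvA (P ++ [pvNextA P h]) := by
  refine ⟨by simp, ?_, ?_⟩
  · rw [List.pairwise_append]
    exact ⟨h.2.1, List.pairwise_singleton _ _, by simpa using pvNextA_gt P h⟩
  · intro p hp
    rcases List.mem_append.mp hp with hp | hp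
    · exact h.2.2 p hp
    · have hm := pvLastA_mem P h.1
      have := h.2.2 _ hm
      have := pvNextA_gt P h _ hm
      simp at hp; omega

-- one pass `for n in number: …` : divisible plates appended to res, others pushed with insert(0)
def pvPass (p : Int) (res number : List Int) : List Int × List Int :=
  number.foldl (fun st n =>
    if PySem.Int.mod n p == 0 then (st.1 ++ [n], st.2) else (st.1, n :: st.2)) (res, [])

-- `for i in range(q)` (the Bool records i == 0: no search on the first pass), then the final pop loop
def pvLoopA : Nat → Bool → List Int → List Int → {P : List Int // pvInvA P} → List Int
  | 0, _, res, number, _ => res ++ number.reverse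
  | k+1, true, res, number, Pr =>
      let nextPr := pvLastA Pr.1
      let st := pvPass nextPr res number
      pvLoopA k false st.1 st.2 Pr
  | k+1, false, res, number, ⟨P, hP⟩ =>
      let nextPr := pvNextA P hP
      let st := pvPass nextPr res number
      pvLoopA k false st.1 st.2 ⟨P ++ [nextPr], pvInvA_append P hP⟩

lemma pvInvA_two : pvInvA [2] := ⟨by simp, List.pairwise_singleton _ _, by simp⟩

def waiter (number : List Int) (q : Int) : List Int :=
  pvLoopA q.toNat true [] number ⟨[2], pvInvA_two⟩

-- ===== PORT B =====

-- `all(cand % p for p in primes)`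
def pvTestB (P : List Int) (c : Int) : Bool := P.all (fun p => PySem.Int.mod c p != 0)

lemma pvNextB_exists (P : List Int) (h : ∀ p ∈ P, 2 ≤ p) (cand : Int) :
    ∃ n : Nat, pvTestB P (cand + (n : Int)) = true := by
  obtain ⟨n, hn⟩ := pvNoDiv_exists P h cand
  exact ⟨n, by simpa [pvTestB, List.all_eq_true] using hn⟩

-- `while not all(cand % p for p in primes): cand += 1` : least passing candidate from cand
def pvNextB (P : List Int) (h : ∀ p ∈ P, 2 ≤ p) (cand : Int) : Int :=
  cand + (Nat.find (pvNextB_exists P h cand) : Int)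

-- `while len(primes) < q:` — one iteration appends one prime, so q.toNat iterations
lemma pvNextB_ge (P : List Int) (h : ∀ p ∈ P, 2 ≤ p) (cand : Int) :
    cand ≤ pvNextB P h cand := by
  have : (0 : Int) ≤ (Nat.find (pvNextB_exists P h cand) : Int) := by positivity
  unfold pvNextB; omega

lemma pvGenB_inv (P : List Int) (cand : Int)
    (h : (∀ p ∈ P, 2 ≤ p) ∧ 2 ≤ cand) :
    (∀ p ∈ P ++ [pvNextB P h.1 cand], 2 ≤ p) ∧ 2 ≤ pvNextB P h.1 cand + 1 := by
  have hge := pvNextB_ge P h.1 cand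
  refine ⟨fun p hp => ?_, by omega⟩
  rcases List.mem_append.mp hp with hp | hp
  · exact h.1 p hp
  · simp at hp; omega

def pvGenB : Nat → {s : List Int × Int // (∀ p ∈ s.1, 2 ≤ p) ∧ 2 ≤ s.2} → List Int
  | 0, s => s.1.1
  | k+1, ⟨(P, cand), h⟩ =>
      pvGenB k ⟨(P ++ [pvNextB P h.1 cand], pvNextB P h.1 cand + 1), pvGenB_inv P cand h⟩

-- the inner `for i, p in enumerate(primes): … break / else:` — index of the first dividing prime
def pvFirstDiv (primes : List Int) (n : Int) : Option Nat :=
  match primes with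
  | [] => none
  | p :: ps => if PySem.Int.mod n p == 0 then some 0 else (pvFirstDiv ps n).map (· + 1)

-- the single classification pass: groups[i].append(n) / rest.append(n)
def pvClassify (primes : List Int) (number : List Int) : List (List Int) × List Int :=
  number.foldl (fun st n =>
    match pvFirstDiv primes n with
    | some i => (st.1.modify i (· ++ [n]), st.2)
    | none => (st.1, st.2 ++ [n]))
    (List.replicate primes.length [], [])

-- `res += g if i % 2 == 0 else g[::-1]` over enumerate(groups), then the rest by parity
def pvAssembleB (primes : List Int) (st : List (List Int) × List Int) : List Int :=
  ((PySem.List.enumerate st.1).foldl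
      (fun acc ig => acc ++ (if PySem.Int.mod ig.1 2 == 0 then ig.2 else ig.2.reverse)) [])
    ++ (if PySem.Int.mod (primes.length : Int) 2 == 1 then st.2 else st.2.reverse)

def waiter_alt (number : List Int) (q : Int) : List Int :=
  let primes := pvGenB q.toNat ⟨([], 2), ⟨by simp, le_refl _⟩⟩
  pvAssembleB primes (pvClassify primes number)

-- ===== PRECONDITION & SPEC =====
def Spec_waiter (number : List Int) (q : Int) (out : List Int) : Prop := out = waiter_alt number q
instance (number : List Int) (q : Int) (out : List Int) : Decidable (Spec_waiter number q out) := by unfold Spec_waiter; infer_instance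

-- ===== CLAIM (what is proved, stated in full; the proofs are below) =====
def Claim_equal_waiter : Prop := ∀ (number : List Int) (q : Int), Dom_waiter number q → Spec_waiter number q (waiter number q)

-- ===== LEMMAS AND PROOFS =====

def pvDiv (p n : Int) : Bool := PySem.Int.mod n p == 0

-- the successive primes A appends after state P (spec-side mirror of the searches)
def pvNew : Nat → (P : List Int) → pvInvA P → List Int
  | 0, _, _ => []
  | k+1, P, h => pvNextA P h :: pvNew k (P ++ [pvNextA P h]) (pvInvA_append P h)

-- A's q partition passes followed by the pop loop, as a recursion over the prime list
def pvAsm : List Int → List Int → List Int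
  | [], s => s.reverse
  | p :: ps, s => s.filter (pvDiv p) ++ pvAsm ps ((s.filter (fun n => !pvDiv p n)).reverse)

lemma pvPass_fold (p : Int) (nm : List Int) : ∀ (res acc : List Int),
    nm.foldl (fun st n =>
        if PySem.Int.mod n p == 0 then (st.1 ++ [n], st.2) else (st.1, n :: st.2)) (res, acc)
      = (res ++ nm.filter (pvDiv p), (nm.filter (fun n => !pvDiv p n)).reverse ++ acc) := by
  induction nm with
  | nil => intro res acc; simp
  | cons n t ih =>
    intro res acc
    by_cases hd : (PySem.Int.mod n p == 0) = true
    · rw [List.foldl_cons, if_pos hd, ih]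
      simp [pvDiv, List.filter_cons, hd]
    · rw [List.foldl_cons, if_neg hd, ih]
      simp [pvDiv, List.filter_cons, hd]

lemma pvPass_spec (p : Int) (res nm : List Int) :
    pvPass p res nm = (res ++ nm.filter (pvDiv p), (nm.filter (fun n => !pvDiv p n)).reverse) := by
  unfold pvPass; rw [pvPass_fold]; simp

lemma pvLoopA_asm (k : Nat) : ∀ (P : List Int) (h : pvInvA P) (res nm : List Int),
    pvLoopA k false res nm ⟨P, h⟩ = res ++ pvAsm (pvNew k P h) nm := by
  induction k with
  | zero => intro P h res nm; simp [pvLoopA, pvNew, pvAsm]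
  | succ k ih =>
    intro P h res nm
    rw [pvLoopA]
    simp only [pvPass_spec]
    rw [ih]
    simp [pvNew, pvAsm, List.append_assoc]

lemma pvLoopA_first (k : Nat) (P : List Int) (h : pvInvA P) (res nm : List Int) :
    pvLoopA (k+1) true res nm ⟨P, h⟩ = res ++ pvAsm (pvLastA P :: pvNew k P h) nm := by
  rw [pvLoopA]
  simp only [pvPass_spec]
  rw [pvLoopA_asm]
  simp [pvAsm, List.append_assoc]

lemma pvNext_eq (P : List Int) (hA : pvInvA P) (h1 : ∀ p ∈ P, 2 ≤ p) :
    pvNextB P h1 (pvLastA P + 1) = pvNextA P hA := by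
  unfold pvNextA pvNextB
  have hpred : ∀ n : Nat,
      (pvTestB P (pvLastA P + 1 + (n : Int)) = true)
        ↔ (pvTestA P (pvLastA P + 1 + (n : Int)) P = true) := fun n => by
    rw [pvTestA_iff P hA]; simp [pvTestB, List.all_eq_true]
  have hfind : Nat.find (pvNextB_exists P h1 (pvLastA P + 1))
      = Nat.find (pvNextA_exists P hA (pvLastA P)) :=
    Nat.find_congr (Nat.find_spec (pvNextB_exists P h1 (pvLastA P + 1)))
      (fun n _ => hpred n)
  rw [hfind]

lemma pvGenB_congr (k : Nat) (x y : {s : List Int × Int // (∀ p ∈ s.1, 2 ≤ p) ∧ 2 ≤ s.2})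
    (h : x.1 = y.1) : pvGenB k x = pvGenB k y := by
  cases x with
  | mk v hv =>
    cases y with
    | mk w hw =>
      simp only at h
      subst h
      rfl

lemma pvGenB_eq (k : Nat) : ∀ (P : List Int) (hA : pvInvA P)
    (hs : (∀ p ∈ P, 2 ≤ p) ∧ 2 ≤ pvLastA P + 1),
    pvGenB k ⟨(P, pvLastA P + 1), hs⟩ = P ++ pvNew k P hA := by
  induction k with
  | zero => intro P hA hs; simp [pvGenB, pvNew]
  | succ k ih =>
    intro P hA hs
    rw [pvGenB, pvNew]
    have hc : pvNextB P hs.1 (pvLastA P + 1) = pvNextA P hA := pvNext_eq P hA hs.1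
    have hlastc : pvLastA (P ++ [pvNextA P hA]) = pvNextA P hA := by
      rw [pvLastA_append P [pvNextA P hA] (by simp), pvLastA_singleton]
    have h2c : 2 ≤ pvNextA P hA :=
      (pvInvA_append P hA).2.2 _ (by simp)
    have inv' : (∀ p ∈ P ++ [pvNextA P hA], 2 ≤ p)
        ∧ 2 ≤ pvLastA (P ++ [pvNextA P hA]) + 1 :=
      ⟨(pvInvA_append P hA).2.2, by rw [hlastc]; omega⟩
    calc pvGenB k ⟨(P ++ [pvNextB P hs.1 (pvLastA P + 1)],
            pvNextB P hs.1 (pvLastA P + 1) + 1), pvGenB_inv P (pvLastA P + 1) hs⟩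
        = pvGenB k ⟨(P ++ [pvNextA P hA], pvLastA (P ++ [pvNextA P hA]) + 1), inv'⟩ := by
          apply pvGenB_congr
          simp [hc, hlastc]
      _ = (P ++ [pvNextA P hA]) ++ pvNew k (P ++ [pvNextA P hA]) (pvInvA_append P hA) :=
          ih (P ++ [pvNextA P hA]) (pvInvA_append P hA) inv'
      _ = P ++ pvNextA P hA :: pvNew k (P ++ [pvNextA P hA]) (pvInvA_append P hA) := by
          simp

-- ===== classification as filters =====

lemma pvFirstDiv_lt (ps : List Int) (n : Int) : ∀ i, pvFirstDiv ps n = some i → i < ps.length := by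
  induction ps with
  | nil => intro i h; simp [pvFirstDiv] at h
  | cons p t ih =>
    intro i h
    by_cases hd : PySem.Int.mod n p = 0
    · simp [pvFirstDiv, hd] at h
      subst h
      simp
    · simp [pvFirstDiv, hd] at h
      obtain ⟨j, hj, rfl⟩ := h
      have := ih j hj
      simp; omega

lemma pvMap_getD (g : List (List Int)) :
    (List.range g.length).map (fun i => g.getD i []) = g := by
  apply List.ext_getElem
  · simp
  · intro j h1 h2
    have hj : j < g.length := by simpa using h1
    simp [List.getD_eq_getElem?_getD, List.getElem?_eq_getElem hj]

lemma pvClassify_fold (ps : List Int) (nm : List Int) : ∀ (g : List (List Int)) (r : List Int),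
    ps.length ≤ g.length →
    nm.foldl (fun st n =>
        match pvFirstDiv ps n with
        | some i => (st.1.modify i (· ++ [n]), st.2)
        | none => (st.1, st.2 ++ [n])) (g, r)
      = ((List.range g.length).map
            (fun i => g.getD i [] ++ nm.filter (fun n => pvFirstDiv ps n == some i)),
         r ++ nm.filter (fun n => pvFirstDiv ps n == none)) := by
  induction nm with
  | nil =>
    intro g r _
    simp only [List.foldl_nil, List.filter_nil, List.append_nil, pvMap_getD]
  | cons n t ih =>
    intro g r hg
    rw [List.foldl_cons]
    cases hfd : pvFirstDiv ps n with
    | none =>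
      simp only [hfd]
      rw [ih g (r ++ [n]) hg]
      simp only [Prod.mk.injEq]
      refine ⟨?_, ?_⟩
      · apply List.map_congr_left
        intro j hj
        simp [List.filter_cons, hfd]
      · simp [List.filter_cons, hfd]
    | some i =>
      have hi : i < g.length := lt_of_lt_of_le (pvFirstDiv_lt ps n i hfd) hg
      simp only [hfd]
      rw [ih (g.modify i (· ++ [n])) r (by simpa using hg)]
      simp only [Prod.mk.injEq]
      refine ⟨?_, ?_⟩
      · rw [List.length_modify]
        apply List.map_congr_left
        intro j hj
        simp at hj
        by_cases hij : j = i
        · subst hij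
          simp [List.filter_cons, hfd,
            List.getD_eq_getElem?_getD, List.getElem?_modify,
            List.getElem?_eq_getElem hj]
        · have hne : i ≠ j := by omega
          simp [List.filter_cons, hfd, hne,
            List.getD_eq_getElem?_getD, List.getElem?_modify,
            List.getElem?_eq_getElem hj]
      · simp [List.filter_cons, hfd]

lemma pvClassify_eq (ps nm : List Int) :
    pvClassify ps nm
      = ((List.range ps.length).map
            (fun i => nm.filter (fun n => pvFirstDiv ps n == some i)),
         nm.filter (fun n => pvFirstDiv ps n == none)) := by
  unfold pvClassify
  rw [pvClassify_fold ps nm _ _ (by simp)]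
  simp

-- ===== assembly as an indexed concatenation =====

def pvCat : Int → List (List Int) → List Int
  | _, [] => []
  | i, g :: gs => (if PySem.Int.mod i 2 == 0 then g else g.reverse) ++ pvCat (i+1) gs

lemma pvFoldEnum (l : List (List Int)) : ∀ (s : Int) (acc : List Int),
    (PySem.List.enumerate l s).foldl
        (fun acc ig => acc ++ (if PySem.Int.mod ig.1 2 == 0 then ig.2 else ig.2.reverse)) acc
      = acc ++ pvCat s l := by
  induction l with
  | nil => intro s acc; simp [PySem.List.enumerate, pvCat]
  | cons g gs ih =>
    intro s acc
    rw [PySem.List.enumerate_cons, List.foldl_cons, ih]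
    simp [pvCat]

lemma pvCat_succ (gs : List (List Int)) : ∀ i : Int,
    pvCat (i+1) gs = pvCat i (gs.map List.reverse) := by
  induction gs with
  | nil => intro i; simp [pvCat]
  | cons g t ih =>
    intro i
    rw [List.map_cons, pvCat, pvCat, ih]
    have h2 : (0:Int) < 2 := by norm_num
    simp only [PySem.Int.mod_eq_emod_of_pos h2, beq_iff_eq]
    split_ifs with ha hb hb
    · omega
    · simp
    · rfl
    · omega

-- ===== pvFirstDiv cons filters =====

lemma pvFD_zero (p : Int) (ps : List Int) (nm : List Int) :
    nm.filter (fun n => pvFirstDiv (p :: ps) n == some 0) = nm.filter (pvDiv p) := by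
  apply List.filter_congr
  intro n _
  by_cases hd : PySem.Int.mod n p = 0
  · simp [pvFirstDiv, hd, pvDiv]
  · cases hfd : pvFirstDiv ps n <;> simp [pvFirstDiv, hd, pvDiv, hfd]

lemma pvFD_succ (p : Int) (ps : List Int) (nm : List Int) (i : Nat) :
    nm.filter (fun n => pvFirstDiv (p :: ps) n == some (i+1))
      = (nm.filter (fun n => !pvDiv p n)).filter (fun n => pvFirstDiv ps n == some i) := by
  rw [List.filter_filter]
  apply List.filter_congr
  intro n _
  by_cases hd : PySem.Int.mod n p = 0
  · simp [pvFirstDiv, hd, pvDiv]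
  · cases hfd : pvFirstDiv ps n <;> simp [pvFirstDiv, hd, pvDiv, hfd]

lemma pvFD_none (p : Int) (ps : List Int) (nm : List Int) :
    nm.filter (fun n => pvFirstDiv (p :: ps) n == none)
      = (nm.filter (fun n => !pvDiv p n)).filter (fun n => pvFirstDiv ps n == none) := by
  rw [List.filter_filter]
  apply List.filter_congr
  intro n _
  by_cases hd : PySem.Int.mod n p = 0
  · simp [pvFirstDiv, hd, pvDiv]
  · cases hfd : pvFirstDiv ps n <;> simp [pvFirstDiv, hd, pvDiv, hfd]

-- ===== B's classify + assemble equals A's pass recursion =====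

lemma pvCat_cons_zero (g : List Int) (gs : List (List Int)) :
    pvCat 0 (g :: gs) = g ++ pvCat 1 gs := by
  rw [pvCat, if_pos (by decide : (PySem.Int.mod 0 2 == 0) = true)]
  norm_num

lemma pvB_asm (ps : List Int) : ∀ nm : List Int,
    pvAssembleB ps (pvClassify ps nm) = pvAsm ps nm := by
  induction ps with
  | nil =>
    intro nm
    rw [pvClassify_eq]
    simp [pvAssembleB, pvAsm, pvCat, pvFirstDiv, PySem.List.enumerate,
      PySem.Int.mod]
  | cons p tl ih =>
    intro nm
    rw [pvClassify_eq, pvAsm]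
    have iht := (ih ((nm.filter (fun n => !pvDiv p n)).reverse)).symm
    rw [pvClassify_eq] at iht
    simp only [pvAssembleB] at iht ⊢
    rw [pvFoldEnum] at iht ⊢
    rw [iht]
    rw [List.length_cons, List.range_succ_eq_map, List.map_cons, List.map_map,
      pvCat_cons_zero, show (1:Int) = 0 + 1 from by norm_num, pvCat_succ,
      List.map_map, pvFD_zero]
    have hX : (List.range tl.length).map
          (List.reverse ∘ ((fun i => nm.filter (fun n => pvFirstDiv (p :: tl) n == some i)) ∘ Nat.succ))
        = (List.range tl.length).map
          (fun i => ((nm.filter (fun n => !pvDiv p n)).reverse).filter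
            (fun n => pvFirstDiv tl n == some i)) := by
      apply List.map_congr_left
      intro i _
      simp only [Function.comp_apply]
      rw [show Nat.succ i = i + 1 from rfl, pvFD_succ, List.filter_reverse]
    rw [hX]
    have hD : (if PySem.Int.mod ((tl.length : Int) + 1) 2 == 1
            then nm.filter (fun n => pvFirstDiv (p :: tl) n == none)
            else (nm.filter (fun n => pvFirstDiv (p :: tl) n == none)).reverse)
        = (if PySem.Int.mod ((tl.length : Nat) : Int) 2 == 1
            then ((nm.filter (fun n => !pvDiv p n)).reverse).filter
              (fun n => pvFirstDiv tl n == none)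
            else (((nm.filter (fun n => !pvDiv p n)).reverse).filter
              (fun n => pvFirstDiv tl n == none)).reverse) := by
      rw [pvFD_none, List.filter_reverse]
      have h2 : (0:Int) < 2 := by norm_num
      simp only [PySem.Int.mod_eq_emod_of_pos h2, beq_iff_eq]
      split_ifs with ha hb hb
      · omega
      · simp
      · rfl
      · omega
    push_cast
    rw [hD]
    simp [List.append_assoc]

-- ===== VERDICT (by name: the statement is the Claim_ definition above) =====
theorem waiter_spec : Claim_equal_waiter := by
  unfold Claim_equal_waiter
  intro number q _
  unfold Spec_waiter waiter waiter_alt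
  cases hq : q.toNat with
  | zero =>
    show pvLoopA 0 true [] number ⟨[2], pvInvA_two⟩
      = pvAssembleB (pvGenB 0 ⟨([], 2), ⟨by simp, le_refl _⟩⟩)
          (pvClassify (pvGenB 0 ⟨([], 2), ⟨by simp, le_refl _⟩⟩) number)
    rw [pvB_asm]
    simp [pvLoopA, pvGenB, pvAsm]
  | succ k =>
    show pvLoopA (k+1) true [] number ⟨[2], pvInvA_two⟩
      = pvAssembleB (pvGenB (k+1) ⟨([], 2), ⟨by simp, le_refl _⟩⟩)
          (pvClassify (pvGenB (k+1) ⟨([], 2), ⟨by simp, le_refl _⟩⟩) number)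
    have hg : pvGenB (k+1) ⟨([], 2), ⟨by simp, le_refl _⟩⟩
        = 2 :: pvNew k [2] pvInvA_two := by
      rw [pvGenB]
      have hc0 : pvNextB [] (by simp) 2 = 2 := by
        unfold pvNextB
        rw [(Nat.find_eq_zero _).mpr (by simp [pvTestB])]
        norm_num
      calc pvGenB k ⟨([] ++ [pvNextB [] _ 2], pvNextB [] _ 2 + 1), _⟩
          = pvGenB k ⟨([2], pvLastA [2] + 1), ⟨by simp, by rw [pvLastA_singleton]; omega⟩⟩ := by
            apply pvGenB_congr
            simp [hc0, pvLastA_singleton]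
        _ = [2] ++ pvNew k [2] pvInvA_two := pvGenB_eq k [2] pvInvA_two _
        _ = 2 :: pvNew k [2] pvInvA_two := rfl
    rw [hg, pvB_asm, pvLoopA_first k [2] pvInvA_two [] number, pvLastA_singleton]
    rfl
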